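-- pv_equiv track=rewrite | github.com/aparnakr/pos-analysis | threshold.py | modified_factorial
-- ===== SOURCE A (Python) =====
-- fact_memo = {}
--
-- def modified_factorial(start, length):
--     if (start, length) in fact_memo:
--         return fact_memo[(start, length)]
--     result = 1
--     for i in range(0, length):
--         result *= (start + i)
--     fact_memo[(start, length)] = result
--     return result
-- ===== SOURCE B (Python) =====
-- fact_memo = {}
--
-- def modified_factorial(start, length):
--     if (start, length) in fact_memo:
--         return fact_memo[(start, length)]
--     result = _rising_prod(start, length)
--     fact_memo[(start, length)] = result
--     return result
--
-- def _rising_prod(lo, n):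
--     # divide-and-conquer product of the n consecutive integers lo, lo+1, ..., lo+n-1
--     if n <= 0:
--         return 1
--     if n == 1:
--         return lo
--     h = n // 2
--     return _rising_prod(lo, h) * _rising_prod(lo + h, n - h)
-- ===== Notes on version B (the rewrite author's own statement) =====
-- stated objective: faster
-- what changed: Replaced the left-to-right accumulation loop by a divide-and-conquer (balanced binary split) product over the range [start, start+length); the memo lookup/store is unchanged.
import Mathlib
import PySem

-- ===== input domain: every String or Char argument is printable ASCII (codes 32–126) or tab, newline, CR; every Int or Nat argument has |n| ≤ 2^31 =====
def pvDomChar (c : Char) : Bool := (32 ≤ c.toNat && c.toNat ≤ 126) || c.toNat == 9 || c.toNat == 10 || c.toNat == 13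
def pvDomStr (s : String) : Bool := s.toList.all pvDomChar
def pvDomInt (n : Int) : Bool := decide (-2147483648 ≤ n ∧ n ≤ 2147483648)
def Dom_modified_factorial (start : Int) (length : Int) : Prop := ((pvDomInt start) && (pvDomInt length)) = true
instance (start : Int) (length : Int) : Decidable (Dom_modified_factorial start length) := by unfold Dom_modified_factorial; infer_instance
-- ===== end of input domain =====

-- B replaces A's left-to-right accumulation loop by a divide-and-conquer product over
-- [start, start+length), measurably faster on big operands; the equivalence proved here is
-- about the RETURN value only (the fact_memo caching side effect, identical in both Pythons,
-- is not modelled).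

-- ===== PORT A =====
-- result = 1; for i in range(0, length): result *= (start + i)
def modified_factorial (start : Int) (length : Int) : Int :=
  (PySem.List.pyRange 0 length 1).foldl (fun result i => result * (start + i)) 1

-- ===== PORT B =====
-- divide-and-conquer product of lo, lo+1, ..., lo+n-1 (transliteration of _rising_prod)
def pvRisingProd (lo : Int) (n : Int) : Int :=
  if n ≤ 0 then 1
  else if n = 1 then lo
  else
    let h := PySem.Int.floordiv n 2
    pvRisingProd lo h * pvRisingProd (lo + h) (n - h)
termination_by n.toNat
decreasing_by
  · have h2 : (0:Int) < 2 := by omega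
    rw [PySem.Int.floordiv_eq_ediv_of_pos h2]
    omega
  · have h2 : (0:Int) < 2 := by omega
    rw [PySem.Int.floordiv_eq_ediv_of_pos h2]
    omega

def modified_factorial_alt (start : Int) (length : Int) : Int :=
  pvRisingProd start length

-- ===== PRECONDITION & SPEC =====
def Spec_modified_factorial (start : Int) (length : Int) (out : Int) : Prop := out = modified_factorial_alt start length
instance (start : Int) (length : Int) (out : Int) : Decidable (Spec_modified_factorial start length out) := by unfold Spec_modified_factorial; infer_instance

-- ===== CLAIM (what is proved, stated in full; the proofs are below) =====
def Claim_equal_modified_factorial : Prop := ∀ (start : Int) (length : Int), Dom_modified_factorial start length → Spec_modified_factorial start length (modified_factorial start length)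

-- ===== LEMMAS AND PROOFS =====

-- reference rising product, one factor at a time from the right
def pvRP (lo : Int) : Nat → Int
  | 0 => 1
  | n + 1 => pvRP lo n * (lo + n)

-- A's foldl equals the reference product (accumulator generalised)
theorem pvFoldl_eq_rp (start : Int) (n : Nat) (acc : Int) :
    (PySem.List.pyRange 0 (n : Int) 1).foldl (fun r i => r * (start + i)) acc
      = acc * pvRP start n := by
  induction n generalizing acc with
  | zero => simp [pvRP]
  | succ m ih =>
      have h : (0:Int) ≤ (m : Int) := by positivity
      rw [show ((m + 1 : Nat) : Int) = (m : Int) + 1 by push_cast; ring,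
        PySem.List.pyRange_one_succ_right h, List.foldl_append, ih]
      simp [pvRP, mul_assoc]

theorem pvModified_eq_rp (start length : Int) :
    modified_factorial start length = pvRP start length.toNat := by
  unfold modified_factorial
  rcases le_or_gt length 0 with h | h
  · rw [PySem.List.pyRange_one_eq_nil h]
    simp [Int.toNat_of_nonpos h, pvRP]
  · have := pvFoldl_eq_rp start length.toNat 1
    rw [Int.toNat_of_nonneg (le_of_lt h)] at this
    rw [this, one_mul]

-- splitting the reference product
theorem pvRP_add (lo : Int) (a b : Nat) :
    pvRP lo (a + b) = pvRP lo a * pvRP (lo + a) b := by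
  induction b with
  | zero => simp [pvRP]
  | succ k ih =>
      show pvRP lo (a + k + 1) = _
      rw [pvRP, ih, pvRP]
      push_cast
      ring

-- B's divide-and-conquer equals the reference product
theorem pvRisingProd_eq_rp (lo n : Int) : pvRisingProd lo n = pvRP lo n.toNat := by
  fun_induction pvRisingProd lo n with
  | case1 lo n hle => rw [Int.toNat_of_nonpos hle]; rfl
  | case2 lo hn => simp [pvRP]
  | case3 lo n h0 h1 h ih1 ih2 =>
      have h2 : (0:Int) < 2 := by omega
      have hh : h = n / 2 := PySem.Int.floordiv_eq_ediv_of_pos h2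
      have hn : ¬ n ≤ 0 := h0
      have hb : 1 ≤ h ∧ h < n := by constructor <;> (rw [hh]; omega)
      rw [ih1, ih2]
      have hsplit : n.toNat = h.toNat + (n - h).toNat := by omega
      rw [hsplit, pvRP_add]
      have hc : ((h.toNat : Int)) = h := Int.toNat_of_nonneg (by omega)
      rw [hc]

-- ===== VERDICT (by name: the statement is the Claim_ definition above) =====
theorem modified_factorial_spec : Claim_equal_modified_factorial := by
  intro start length _
  unfold Spec_modified_factorial modified_factorial_alt
  rw [pvModified_eq_rp, pvRisingProd_eq_rp]
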